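-- pv_equiv track=rewrite | github.com/Alferdize/Data-Structure-and-Algorithms | Algorithms/binary_search.com/Bunnyhopping.py | solve
-- ===== SOURCE A (Python) =====
-- def solve(nums, k):
--     costs = [-1] * len(nums)
--     costs[-1] = nums[-1]
--     queue = [nums[-1]]
--     min_cost = nums[-1]
--     for i in range(len(nums)-2, -1, -1):
--         costs[i] = nums[i] + min_cost
--         if costs[i] < min_cost:
--             min_cost = costs[i]
--         elif (i + k) < len(costs) and costs[i + k] == min_cost:
--             min_cost = min(costs[i:i+k])
--     return costs[0]
-- ===== SOURCE B (Python) =====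
-- def solve(nums, k):
--     # Build the suffix hop-costs right-to-left in one plain pass,
--     # recomputing the window minimum directly instead of maintaining it
--     # incrementally with eviction logic as A does.
--     acc = [nums[-1]]              # costs of the already-processed suffix, nearest index last
--     for x in reversed(nums[:-1]):
--         acc.append(x + min(acc[-k:]))
--     return acc[-1]
-- ===== Notes on version B (the rewrite author's own statement) =====
-- stated objective: simpler
-- what changed: A keeps a running window minimum updated by branch/eviction logic over a mutated fixed-size array; B drops all of that state and simply appends nums[i] + min(last k suffix costs) in one backward pass over a growing list.
-- outside the precondition, e.g. on solve([1, 2], -1): A returns 3, B raises ValueError; on solve([3, 1, 2], 0): A returns 5, B returns 5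
import Mathlib
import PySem

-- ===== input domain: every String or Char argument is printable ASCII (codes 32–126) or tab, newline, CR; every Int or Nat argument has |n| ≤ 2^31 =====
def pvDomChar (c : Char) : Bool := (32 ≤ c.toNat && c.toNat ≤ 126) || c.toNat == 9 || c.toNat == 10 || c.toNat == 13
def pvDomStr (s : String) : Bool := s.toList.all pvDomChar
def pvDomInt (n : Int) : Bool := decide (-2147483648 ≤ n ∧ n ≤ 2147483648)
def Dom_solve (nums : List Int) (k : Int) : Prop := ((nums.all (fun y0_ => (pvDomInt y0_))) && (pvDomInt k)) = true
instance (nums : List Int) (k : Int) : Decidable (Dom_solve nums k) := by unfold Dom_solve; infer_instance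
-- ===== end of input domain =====

-- B re-implements A's backward DP without A's incrementally maintained window minimum
-- (branch/eviction state over a mutated array): one plain backward pass that recomputes
-- min over the last k suffix costs each step — simpler, same worst-case cost.

-- ===== PORT A =====
-- loop body of A's for-loop, named so the proofs can speak about it
def solveStep (nums : List Int) (k n : Int) (st : List Int × Int) (i : Int) : List Int × Int :=
  let costs := st.1
  let min_cost := st.2
  let ci := PySem.List.pyGetD nums i 0 + min_cost          -- nums[i]; i always in range in the loop
  let costs := PySem.List.pySetD costs i ci                -- costs[i] = ...; i always in range
  if ci < min_cost then (costs, ci)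
  else if i + k < n ∧ PySem.List.pyGetD costs (i + k) 0 = min_cost then
    -- min(costs[i:i+k]); none = ValueError on an empty slice, excluded by Pre_ (k ≥ 1)
    (costs, (PySem.List.min? (PySem.List.slice costs (some i) (some (i + k))) (fun y => y)).getD 0)
  else (costs, min_cost)

def solve (nums : List Int) (k : Int) : Int :=
  let n : Int := (nums.length : Int)
  let costs : List Int := List.replicate nums.length (-1)
  let last := PySem.List.pyGetD nums (-1) 0                -- nums[-1]; none = IndexError on [], excluded by Pre_
  let costs := PySem.List.pySetD costs (-1) last           -- costs[-1] = nums[-1]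
  let _queue : List Int := [last]                          -- A's dead variable `queue`
  let st := (PySem.List.pyRange (n - 2) (-1) (-1)).foldl (solveStep nums k n) (costs, last)
  PySem.List.pyGetD st.1 0 0                               -- costs[0]

-- ===== PORT B =====
-- Source B's loop: acc.append(x + min(acc[-k:])) for x in reversed(nums[:-1])
def solveAltGo (k : Int) (acc : List Int) : List Int → List Int
  | [] => acc
  | x :: xs =>
      solveAltGo k
        (acc ++ [x + (PySem.List.min? (PySem.List.slice acc (some (-k)) none) (fun y => y)).getD 0]) xs

def solve_alt (nums : List Int) (k : Int) : Int :=
  let acc : List Int := [PySem.List.pyGetD nums (-1) 0]    -- [nums[-1]]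
  let acc := solveAltGo k acc ((PySem.List.slice nums none (some (-1))).reverse)
  PySem.List.pyGetD acc (-1) 0                             -- acc[-1]

-- ===== PRECONDITION & SPEC =====
-- Pre_ excludes empty nums (A raises IndexError) and k ≤ 0, which is outside the natural
-- hop-count domain: there A's value rests on negative-index wraparound of costs[i+k] and A
-- can raise ValueError on an empty slice (B raises ValueError for k < 0).
def Pre_solve (nums : List Int) (k : Int) : Prop := nums ≠ [] ∧ 1 ≤ k
instance (nums : List Int) (k : Int) : Decidable (Pre_solve nums k) := by unfold Pre_solve; infer_instance
def pvWitness_solve : List Int × Int := ([10, 20, 5, 7], 2)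

def Spec_solve (nums : List Int) (k : Int) (out : Int) : Prop := out = solve_alt nums k
instance (nums : List Int) (k : Int) (out : Int) : Decidable (Spec_solve nums k out) := by unfold Spec_solve; infer_instance

-- ===== CLAIM (what is proved, stated in full; the proofs are below) =====
def Claim_equal_solve : Prop := ∀ (nums : List Int) (k : Int), Dom_solve nums k → Pre_solve nums k → Spec_solve nums k (solve nums k)

-- ===== LEMMAS AND PROOFS =====

-- the value min(l) (Python min of a nonempty int list)
def mn (l : List Int) : Int := (PySem.List.min? l (fun y => y)).getD 0

-- reference suffix-cost list, head = cost of the first index of the suffix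
def rf (k : Int) : List Int → List Int
  | [] => []
  | [x] => [x]
  | x :: y :: ys => (x + mn ((rf k (y :: ys)).take k.toNat)) :: rf k (y :: ys)

-- B's loop body on the non-reversed representation
def stepB (k : Int) (r : List Int) (x : Int) : List Int := (x + mn (r.take k.toNat)) :: r

theorem mn_mem (l : List Int) (h : l ≠ []) : mn l ∈ l := by
  obtain ⟨m, hm⟩ := Option.ne_none_iff_exists'.mp
    (fun hn => h ((PySem.List.min?_eq_none_iff l (fun y => y)).mp hn))
  simpa [mn, hm] using PySem.List.min?_mem hm

theorem mn_le (l : List Int) (h : l ≠ []) : ∀ y ∈ l, mn l ≤ y := by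
  obtain ⟨m, hm⟩ := Option.ne_none_iff_exists'.mp
    (fun hn => h ((PySem.List.min?_eq_none_iff l (fun y => y)).mp hn))
  intro y hy
  simpa [mn, hm] using PySem.List.min?_id_le hm y hy

theorem mn_unique (l : List Int) (m : Int) (hm : m ∈ l) (hb : ∀ y ∈ l, m ≤ y) : mn l = m := by
  have h : l ≠ [] := by rintro rfl; simp at hm
  exact le_antisymm (mn_le l h m hm) (hb _ (mn_mem l h))

theorem mn_singleton (x : Int) : mn [x] = x := mn_unique [x] x (by simp) (by simp)

theorem mn_reverse (l : List Int) (h : l ≠ []) : mn l.reverse = mn l := by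
  refine mn_unique l.reverse (mn l) (by simpa using mn_mem l h) ?_
  intro y hy; exact mn_le l h y (by simpa using hy)

theorem rf_ne_nil (k : Int) (l : List Int) (h : l ≠ []) : rf k l ≠ [] := by
  match l with
  | [x] => simp [rf]
  | x :: y :: ys => simp [rf]

theorem rf_length (k : Int) (l : List Int) : (rf k l).length = l.length := by
  match l with
  | [] => simp [rf]
  | [x] => simp [rf]
  | x :: y :: ys => simpa [rf] using rf_length k (y :: ys)

theorem take_ne_nil (K : Nat) (hK : 1 ≤ K) (r : List Int) (hr : r ≠ []) : r.take K ≠ [] := by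
  simp only [ne_eq, List.take_eq_nil_iff]; push_neg; exact ⟨by omega, hr⟩

theorem take_sub_one_subset (K : Nat) (r : List Int) : ∀ y ∈ r.take (K - 1), y ∈ r.take K := by
  intro y hy
  have : r.take (K - 1) = (r.take K).take (K - 1) := by
    rw [List.take_take]; congr 1; omega
  exact List.take_subset _ _ (this ▸ hy)

-- window update, case "new cost is a new minimum"
theorem mn_win_lt (K : Nat) (hK : 1 ≤ K) (r : List Int) (hr : r ≠ []) (ci : Int)
    (hlt : ci < mn (r.take K)) : mn (ci :: r.take (K - 1)) = ci := by
  refine mn_unique _ ci (by simp) ?_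
  intro y hy
  rcases List.mem_cons.mp hy with h | h
  · exact h ▸ le_rfl
  · have : mn (r.take K) ≤ y := mn_le _ (take_ne_nil K hK r hr) y (take_sub_one_subset K r y h)
    omega

-- window update, case "minimum unchanged"
theorem mn_win_keep (K : Nat) (hK : 1 ≤ K) (r : List Int) (hr : r ≠ []) (ci : Int)
    (hge : mn (r.take K) ≤ ci)
    (hne : ∀ (hKl : K - 1 < r.length), K ≤ r.length → r[K - 1]'hKl ≠ mn (r.take K)) :
    mn (ci :: r.take (K - 1)) = mn (r.take K) := by
  have hne' : r.take K ≠ [] := take_ne_nil K hK r hr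
  refine mn_unique _ (mn (r.take K)) ?_ ?_
  · by_cases hlen : K ≤ r.length
    · have hKl : K - 1 < r.length := by omega
      have hsplit : r.take K = r.take (K - 1) ++ [r[K - 1]'hKl] := by
        conv_lhs => rw [show K = (K - 1) + 1 by omega]
        rw [List.take_succ]
        simp [List.getElem?_eq_getElem hKl]
      have hmem2 : mn (r.take K) ∈ r.take (K - 1) ++ [r[K - 1]'hKl] := by
        rw [← hsplit]; exact mn_mem _ hne'
      rcases List.mem_append.mp hmem2 with h | h
      · exact List.mem_cons_of_mem _ h
      · exact (hne hKl hlen (List.mem_singleton.mp h).symm).elim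
    · have h1 : r.take K = r := List.take_of_length_le (by omega)
      have h2 : r.take (K - 1) = r := List.take_of_length_le (by omega)
      refine List.mem_cons_of_mem _ ?_
      rw [h2, h1]
      exact mn_mem r hr
  · intro y hy
    rcases List.mem_cons.mp hy with h | h
    · exact h ▸ hge
    · exact mn_le _ hne' y (take_sub_one_subset K r y h)

theorem set_replicate_append (j : Nat) (c v : Int) (r : List Int) :
    (List.replicate (j + 1) c ++ r).set j v = List.replicate j c ++ v :: r := by
  induction j with
  | zero => simp
  | succ j ih =>
      have : List.replicate (j + 2) c ++ r = c :: (List.replicate (j + 1) c ++ r) := by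
        simp [List.replicate_succ]
      rw [this, List.set_cons_succ, ih]
      simp [List.replicate_succ]

theorem drop_length_sub_one (l : List Int) (h : l ≠ []) :
    l.drop (l.length - 1) = [l.getLast h] := by
  induction l with
  | nil => simp at h
  | cons x xs ih =>
      by_cases hxs : xs = []
      · subst hxs; simp
      · have hlen : 0 < xs.length := List.length_pos_iff.mpr hxs
        have : (x :: xs).length - 1 = (xs.length - 1) + 1 := by simp; omega
        rw [this, List.drop_succ_cons, ih hxs, List.getLast_cons hxs]

-- range(j, -1, -1) peels its first element j
theorem pyRange_down_cons (j : Nat) :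
    PySem.List.pyRange (j : Int) (-1) (-1) = (j : Int) :: PySem.List.pyRange ((j : Int) - 1) (-1) (-1) := by
  rw [PySem.List.pyRange_neg_one_eq_reverse, PySem.List.pyRange_neg_one_eq_reverse]
  rw [PySem.List.pyRange_one, PySem.List.pyRange_one]
  rw [show ((j : Int) + 1 - (-1 + 1)).toNat = j + 1 by omega,
      show ((j : Int) - 1 + 1 - (-1 + 1)).toNat = j by omega, List.range_succ]
  simp

theorem pyRange_down_nil : PySem.List.pyRange (-1 : Int) (-1) (-1) = [] := by
  rw [PySem.List.pyRange_neg_one_eq_reverse, PySem.List.pyRange_one]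
  simp

-- the invariant state of A's loop after processing indices down to j
def stInv (nums : List Int) (k : Int) (j : Nat) : List Int × Int :=
  (List.replicate j (-1) ++ rf k (nums.drop j), mn ((rf k (nums.drop j)).take k.toNat))

-- unfolding rf along drop
theorem rf_drop_cons (nums : List Int) (k : Int) (j : Nat) (hj : j + 1 < nums.length) :
    rf k (nums.drop j) = (nums[j]'(by omega) + mn ((rf k (nums.drop (j + 1))).take k.toNat)) :: rf k (nums.drop (j + 1)) := by
  have h1 : nums.drop j = nums[j]'(by omega) :: nums.drop (j + 1) := List.drop_eq_getElem_cons (by omega)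
  have h2 : nums.drop (j + 1) ≠ [] := by
    have := List.length_drop (l := nums) (i := j + 1)
    intro hc; rw [hc] at this; simp at this; omega
  obtain ⟨y, ys, hys⟩ := List.exists_cons_of_ne_nil h2
  rw [h1, hys, rf, ← hys]

-- one step of A's loop preserves the invariant
theorem step_inv (nums : List Int) (k : Int) (hk : 1 ≤ k) (j : Nat) (hj : j + 1 < nums.length) :
    solveStep nums k (nums.length : Int) (stInv nums k (j + 1)) (j : Int) = stInv nums k j := by
  have hj' : j < nums.length := by omega
  have hd : nums.drop (j + 1) ≠ [] := by
    intro hc; have := congrArg List.length hc; simp at this; omega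
  have hRne : rf k (nums.drop (j + 1)) ≠ [] := rf_ne_nil k _ hd
  have hRlen : (rf k (nums.drop (j + 1))).length = nums.length - (j + 1) := by
    rw [rf_length]; simp
  set R := rf k (nums.drop (j + 1)) with hR
  set K := k.toNat with hKdef
  have hK : 1 ≤ K := by omega
  have hkK : k = (K : Int) := by omega
  set m := mn (R.take K) with hm
  have hget : PySem.List.pyGetD nums ((j : Nat) : Int) 0 = nums[j]'hj' := by
    rw [PySem.List.pyGetD_natCast]; exact List.getD_eq_getElem nums 0 hj'
  have hclen : (List.replicate (j + 1) (-1 : Int) ++ R).length = nums.length := by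
    simp [hRlen]; omega
  have hset : PySem.List.pySetD (List.replicate (j + 1) (-1 : Int) ++ R) ((j : Nat) : Int)
      (nums[j]'hj' + m) = List.replicate j (-1) ++ (nums[j]'hj' + m) :: R := by
    have hlt : j < (List.replicate (j + 1) (-1 : Int) ++ R).length := by omega
    rw [PySem.List.pySetD, PySem.List.pySet?_natCast _ _ _ hlt]
    rw [Option.getD_some, List.set_append_left _ _ (by simp),
      show (List.replicate (j + 1) (-1 : Int)).set j (nums[j]'hj' + m)
          = List.replicate j (-1) ++ [nums[j]'hj' + m] from by
        simpa using set_replicate_append j (-1) (nums[j]'hj' + m) []]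
    simp
  have htake : ((nums[j]'hj' + m) :: R).take K = (nums[j]'hj' + m) :: R.take (K - 1) := by
    conv_lhs => rw [show K = (K - 1) + 1 by omega]
    rw [List.take_succ_cons]
  have hrfj : rf k (nums.drop j) = (nums[j]'hj' + m) :: R := rf_drop_cons nums k j hj
  have hinvj : stInv nums k j
      = (List.replicate j (-1) ++ (nums[j]'hj' + m) :: R, mn ((nums[j]'hj' + m) :: R.take (K - 1))) := by
    rw [stInv, hrfj, htake]
  have hinvj1 : stInv nums k (j + 1) = (List.replicate (j + 1) (-1) ++ R, m) := by
    rw [stInv]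
  have hlen2 : (List.replicate j (-1 : Int) ++ (nums[j]'hj' + m) :: R).length = nums.length := by
    simp [hRlen]; omega
  have hgetk : ∀ (hjk : (j : Int) + k < (nums.length : Int)),
      PySem.List.pyGetD (List.replicate j (-1 : Int) ++ (nums[j]'hj' + m) :: R) ((j : Int) + k) 0
        = R[K - 1]'(by omega) := by
    intro hjk
    rw [PySem.List.pyGetD_eq_getElem (List.replicate j (-1 : Int) ++ (nums[j]'hj' + m) :: R) 0
      (by omega) (by rw [hlen2]; omega)]
    have hidx : ((j : Int) + k).toNat = j + K := by omega
    simp only [hidx]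
    rw [List.getElem_append_right (by simp : (List.replicate j (-1 : Int)).length ≤ j + K)]
    simp only [List.length_replicate]
    have h3 : j + K - j = (K - 1) + 1 := by omega
    simp only [h3, List.getElem_cons_succ]
  have hslice : PySem.List.slice (List.replicate j (-1 : Int) ++ (nums[j]'hj' + m) :: R)
      (some ((j : Nat) : Int)) (some (((j : Nat) : Int) + k)) = (nums[j]'hj' + m) :: R.take (K - 1) := by
    rw [PySem.List.slice_toNat _ (by omega) (by omega)]
    have h1 : (((j : Nat) : Int) + k).toNat - ((j : Nat) : Int).toNat = K := by omega
    have h2 : ((j : Nat) : Int).toNat = (List.replicate j (-1 : Int)).length := by simp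
    rw [h1, h2, List.drop_left, ← htake]
  rw [hinvj1, hinvj, solveStep]
  simp only [hget, hset]
  by_cases hlt : nums[j]'hj' + m < m
  · rw [if_pos hlt]
    rw [Prod.mk.injEq]
    exact ⟨rfl, (mn_win_lt K hK R hRne _ hlt).symm⟩
  · rw [if_neg hlt]
    by_cases hc2 : (j : Int) + k < (nums.length : Int) ∧
        PySem.List.pyGetD (List.replicate j (-1 : Int) ++ (nums[j]'hj' + m) :: R) ((j : Int) + k) 0 = m
    · rw [if_pos hc2]
      rw [Prod.mk.injEq]
      refine ⟨rfl, ?_⟩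
      rw [hslice]
      rfl
    · rw [if_neg hc2]
      push_neg at hc2
      rw [Prod.mk.injEq]
      refine ⟨rfl, ?_⟩
      refine (mn_win_keep K hK R hRne _ (by omega) ?_).symm
      intro hKl hKle
      have hjk : (j : Int) + k < (nums.length : Int) := by omega
      have hcc := hc2 hjk
      rw [hgetk hjk] at hcc
      exact hcc

-- A's fold from index j-1 down to 0, started in the invariant state, lands in the final state
theorem foldl_inv (nums : List Int) (k : Int) (hk : 1 ≤ k) (j : Nat) (hj : j < nums.length) :
    List.foldl (solveStep nums k (nums.length : Int)) (stInv nums k j)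
      (PySem.List.pyRange ((j : Int) - 1) (-1) (-1)) = stInv nums k 0 := by
  induction j with
  | zero =>
      rw [show ((0 : Nat) : Int) - 1 = (-1 : Int) by norm_num, pyRange_down_nil]
      rfl
  | succ j ih =>
      rw [show ((j + 1 : Nat) : Int) - 1 = (j : Int) by push_cast; ring, pyRange_down_cons j,
        List.foldl_cons, step_inv nums k hk j (by omega)]
      exact ih (by omega)

-- A computes the head of rf
theorem solve_eq_rf_head (nums : List Int) (k : Int) (h : nums ≠ []) (hk : 1 ≤ k) :
    solve nums k = (rf k nums).headD 0 := by
  have hL : 0 < nums.length := List.length_pos_iff.mpr h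
  have hK : 1 ≤ k.toNat := by omega
  have hset : PySem.List.pySetD (List.replicate nums.length (-1 : Int)) (-1) (nums.getLast h)
      = List.replicate (nums.length - 1) (-1) ++ [nums.getLast h] := by
    rw [PySem.List.pySetD, PySem.List.pySet?, PySem.List.pyIdx?]
    rw [if_neg (by omega), if_pos (by simp; omega)]
    simp only [Option.map_some, Option.getD_some]
    rw [show (-(-1 : Int)).toNat = 1 from rfl]
    conv_lhs => rw [show nums.length = (nums.length - 1) + 1 by omega, List.replicate_succ']
    rw [show (List.replicate (nums.length - 1) (-1 : Int) ++ [(-1 : Int)]).length - 1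
          = nums.length - 1 by simp]
    simpa [List.replicate_succ'] using set_replicate_append (nums.length - 1) (-1) (nums.getLast h) []
  have hdrop : nums.drop (nums.length - 1) = [nums.getLast h] := drop_length_sub_one nums h
  have hrfl : rf k (nums.drop (nums.length - 1)) = [nums.getLast h] := by rw [hdrop, rf]
  have hstate : (List.replicate (nums.length - 1) (-1 : Int) ++ [nums.getLast h], nums.getLast h)
      = stInv nums k (nums.length - 1) := by
    rw [stInv, hrfl, List.take_of_length_le (by simp; omega), mn_singleton]
  have hrange : (nums.length : Int) - 2 = ((nums.length - 1 : Nat) : Int) - 1 := by omega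
  show PySem.List.pyGetD
      (List.foldl (solveStep nums k (nums.length : Int))
        (PySem.List.pySetD (List.replicate nums.length (-1 : Int)) (-1) (PySem.List.pyGetD nums (-1) 0),
          PySem.List.pyGetD nums (-1) 0)
        (PySem.List.pyRange ((nums.length : Int) - 2) (-1) (-1))).1 0 0 = (rf k nums).headD 0
  rw [PySem.List.pyGetD_neg_one nums 0 h, hset, hrange, hstate,
    foldl_inv nums k hk (nums.length - 1) (by omega), stInv]
  simp only [List.replicate_zero, List.nil_append, List.drop_zero]
  rw [PySem.List.pyGetD_zero]
  obtain ⟨a, t, ht⟩ := List.exists_cons_of_ne_nil (rf_ne_nil k nums h)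
  simp [ht]

-- B's loop on the reversed representation is stepB on the plain one
theorem goB_eq_foldl (k : Int) (hk : 1 ≤ k) (xs : List Int) :
    ∀ r : List Int, r ≠ [] → solveAltGo k r.reverse xs = (xs.foldl (stepB k) r).reverse := by
  induction xs with
  | nil => intro r _; simp [solveAltGo]
  | cons x xs ih =>
      intro r hr
      have hK : 0 < k.toNat := by omega
      have hks : (-k : Int) = -((k.toNat : Nat) : Int) := by omega
      have hsl : PySem.List.slice r.reverse (some (-k)) none = (r.take k.toNat).reverse := by
        rw [hks, PySem.List.slice_from_neg_natCast r.reverse k.toNat hK]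
        rw [List.length_reverse, ← List.reverse_take]
      have htk : r.take k.toNat ≠ [] := by
        simp only [ne_eq, List.take_eq_nil_iff]; push_neg; exact ⟨by omega, hr⟩
      rw [solveAltGo, hsl]
      have : (PySem.List.min? (r.take k.toNat).reverse (fun y => y)).getD 0 = mn (r.take k.toNat) := by
        simpa [mn] using mn_reverse (r.take k.toNat) htk
      rw [this, show r.reverse ++ [x + mn (r.take k.toNat)] = (stepB k r x).reverse by simp [stepB]]
      exact ih (stepB k r x) (by simp [stepB])

-- folding B's step over the reversed prefix builds rf
theorem foldl_stepB_rf (k : Int) (l : List Int) (h : l ≠ []) :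
    (l.dropLast.reverse).foldl (stepB k) [l.getLast h] = rf k l := by
  induction l with
  | nil => simp at h
  | cons x xs ih =>
      by_cases hxs : xs = []
      · subst hxs; simp [rf]
      · obtain ⟨y, ys, hys⟩ := List.exists_cons_of_ne_nil hxs
        have hdl : (x :: xs).dropLast = x :: xs.dropLast := by rw [hys]; simp
        rw [hdl, List.reverse_cons, List.foldl_append, List.getLast_cons hxs, ih hxs]
        subst hys
        simp only [List.foldl_cons, List.foldl_nil, rf, stepB]

-- B computes the head of rf
theorem solve_alt_eq_rf_head (nums : List Int) (k : Int) (h : nums ≠ []) (hk : 1 ≤ k) :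
    solve_alt nums k = (rf k nums).headD 0 := by
  have hrf : rf k nums ≠ [] := rf_ne_nil k nums h
  show PySem.List.pyGetD
      (solveAltGo k [PySem.List.pyGetD nums (-1) 0] ((PySem.List.slice nums none (some (-1))).reverse)) (-1) 0
    = (rf k nums).headD 0
  rw [PySem.List.pyGetD_neg_one nums 0 h, PySem.List.slice_to_neg_one,
    show [nums.getLast h] = [nums.getLast h].reverse by simp,
    goB_eq_foldl k hk _ [nums.getLast h] (by simp), foldl_stepB_rf k nums h,
    PySem.List.pyGetD_neg_one _ 0 (by simpa using hrf), List.getLast_reverse]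
  obtain ⟨a, t, ht⟩ := List.exists_cons_of_ne_nil hrf
  simp [ht]

-- ===== VERDICT (by name: the statement is the Claim_ definition above) =====
theorem solve_spec : Claim_equal_solve := by
  intro nums k _ hpre
  unfold Spec_solve
  rw [solve_eq_rf_head nums k hpre.1 hpre.2, solve_alt_eq_rf_head nums k hpre.1 hpre.2]
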